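-- pv_equiv track=rewrite | github.com/jabarragann/MasterThesisComputerVision | examples/recursive_powerset.py | calculate_subsets_prefix_new_element
-- ===== SOURCE A (Python) =====
-- def calculate_subsets_prefix_new_element(prefix, new_element, previous_subsets):
--     """
--     Calculate subsets of a prefix and a new element
--
--     :param prefix:
--     :param new_element:
--     :param previous_subsets:
--     :return:
--     """
--     if len(prefix) == 0:
--         return previous_subsets
--     else:
--         new_subset = prefix + new_element
--
--         if new_subset in previous_subsets:
--             return previous_subsets
--         else:
--             previous_subsets += [new_subset]
--             for e in prefix:
--                 new_prefix = prefix.copy()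
--                 new_prefix.remove(e)
--                 previous_subsets = calculate_subsets_prefix_new_element(new_prefix, new_element, previous_subsets)
--             return previous_subsets
-- ===== SOURCE B (Python) =====
-- def calculate_subsets_prefix_new_element(prefix, new_element, previous_subsets):
--     """Iterative re-implementation: explicit LIFO stack replaces the recursion,
--     reproducing the original pre-order DFS (children pushed in reversed order).
--     Mutates previous_subsets in place, like the original."""
--     stack = [prefix]
--     while stack:
--         cur = stack.pop()
--         if len(cur) == 0:
--             continue
--         new_subset = cur + new_element
--         if new_subset in previous_subsets:
--             continue
--         previous_subsets.append(new_subset)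
--         children = []
--         for e in cur:
--             child = cur.copy()
--             child.remove(e)
--             children.append(child)
--         stack.extend(reversed(children))
--     return previous_subsets
-- ===== Notes on version B (the rewrite author's own statement) =====
-- stated objective: alternative
-- what changed: The recursion is replaced by an explicit LIFO-stack worklist loop: children are pushed in reversed order so popping reproduces the original pre-order DFS, and pruning happens at visit time instead of at call time.
import Mathlib
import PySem

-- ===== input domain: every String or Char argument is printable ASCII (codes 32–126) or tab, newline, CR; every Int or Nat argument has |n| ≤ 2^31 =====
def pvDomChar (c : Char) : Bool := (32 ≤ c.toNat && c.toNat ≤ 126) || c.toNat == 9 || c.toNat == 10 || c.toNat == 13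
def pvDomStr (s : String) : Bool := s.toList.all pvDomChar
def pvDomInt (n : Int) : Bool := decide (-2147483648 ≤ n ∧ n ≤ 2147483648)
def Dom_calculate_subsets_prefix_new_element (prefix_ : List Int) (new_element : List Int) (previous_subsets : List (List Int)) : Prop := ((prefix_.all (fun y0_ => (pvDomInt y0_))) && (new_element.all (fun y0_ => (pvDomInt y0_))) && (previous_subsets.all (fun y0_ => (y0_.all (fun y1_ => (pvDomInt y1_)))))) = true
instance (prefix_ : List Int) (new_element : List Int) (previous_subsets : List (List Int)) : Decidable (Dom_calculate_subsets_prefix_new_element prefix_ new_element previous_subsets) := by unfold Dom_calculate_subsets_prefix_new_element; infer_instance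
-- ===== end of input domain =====

-- B replaces the recursion by an explicit LIFO-stack loop reproducing the same pre-order DFS (objective: alternative).
-- Both Pythons mutate previous_subsets in place; the equivalence proved here is about the return value.

-- length of prefix.copy(); prefix.remove(e) when e ∈ prefix (used by both ports' termination)
theorem pv_child_length {l : List Int} {e : Int} (he : e ∈ l) :
    ((PySem.List.remove? l e).getD []).length + 1 = l.length := by
  rw [PySem.List.remove?_eq_some_erase l e he]
  simpa using List.length_erase_add_one he

-- ===== PORT A =====
-- literal transliteration of A's recursion; `new_prefix = prefix.copy(); new_prefix.remove(e)`
-- is PySem.List.remove? (always `some` here since e ∈ prefix, so getD [] is never taken)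
def calculate_subsets_prefix_new_element (prefix_ : List Int) (new_element : List Int) (previous_subsets : List (List Int)) : List (List Int) :=
  if prefix_ = [] then previous_subsets
  else
    let new_subset := prefix_ ++ new_element
    if new_subset ∈ previous_subsets then previous_subsets
    else
      prefix_.attach.foldl
        (fun acc ep =>
          calculate_subsets_prefix_new_element ((PySem.List.remove? prefix_ ep.1).getD []) new_element acc)
        (previous_subsets ++ [new_subset])
termination_by prefix_.length
decreasing_by
  have := pv_child_length ep.2
  omega

-- ===== PORT B =====
-- termination measure of the stack loop: each popped list of length n is replaced by n children of length n-1
def pvWeight (l : List Int) : Nat := Nat.factorial (l.length + 1)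
def pvMeasure (stack : List (List Int)) : Nat := (stack.map pvWeight).sum

theorem pv_sum_map_const {α : Type} (l : List α) (f : α → Nat) (c : Nat)
    (h : ∀ x ∈ l, f x = c) : (l.map f).sum = l.length * c := by
  induction l with
  | nil => simp
  | cons x xs ih =>
    simp only [List.map_cons, List.sum_cons, List.length_cons]
    rw [h x (List.mem_cons_self), ih (fun y hy => h y (List.mem_cons_of_mem x hy))]
    ring

theorem pv_children_measure {cur : List Int} (hne : cur ≠ []) :
    pvMeasure (cur.map (fun e => (PySem.List.remove? cur e).getD [])) < pvWeight cur := by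
  have hlen : 1 ≤ cur.length := by
    cases cur with
    | nil => exact absurd rfl hne
    | cons a l => simp
  have hsum : pvMeasure (cur.map (fun e => (PySem.List.remove? cur e).getD []))
      = cur.length * Nat.factorial cur.length := by
    unfold pvMeasure
    rw [List.map_map]
    refine pv_sum_map_const cur _ _ ?_
    intro e he
    have h1 := pv_child_length he
    simp only [Function.comp, pvWeight]
    rw [show ((PySem.List.remove? cur e).getD []).length + 1 = cur.length from h1]
  rw [hsum]
  unfold pvWeight
  rw [Nat.factorial_succ]
  exact Nat.mul_lt_mul_of_lt_of_le (Nat.lt_succ_self _) (Nat.le_refl _) (Nat.factorial_pos _)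

-- the stack loop of Source B: head of the list is the top of the stack, so
-- `stack.extend(reversed(children))` followed by popping is `children ++ stack`
def pvWork (new_element : List Int) : List (List Int) → List (List Int) → List (List Int)
  | [], prev => prev
  | cur :: stack, prev =>
    if cur = [] then pvWork new_element stack prev
    else if cur ++ new_element ∈ prev then pvWork new_element stack prev
    else pvWork new_element ((cur.map (fun e => (PySem.List.remove? cur e).getD [])) ++ stack)
           (prev ++ [cur ++ new_element])
termination_by s _ => pvMeasure s
decreasing_by
  · simp only [pvMeasure, List.map_cons, List.sum_cons]
    have := Nat.factorial_pos (cur.length + 1)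
    unfold pvWeight; omega
  · simp only [pvMeasure, List.map_cons, List.sum_cons]
    have := Nat.factorial_pos (cur.length + 1)
    unfold pvWeight; omega
  · rename_i hne _
    have h := pv_children_measure hne
    have hattach : List.map (fun x : {x // x ∈ cur} => (PySem.List.remove? cur ↑x).getD []) cur.attach
        = List.map (fun e => (PySem.List.remove? cur e).getD []) cur := by simp
    simp only [hattach, pvMeasure, List.map_cons, List.sum_cons, List.map_append, List.sum_append]
    unfold pvMeasure at h
    omega

def calculate_subsets_prefix_new_element_alt (prefix_ : List Int) (new_element : List Int) (previous_subsets : List (List Int)) : List (List Int) :=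
  pvWork new_element [prefix_] previous_subsets

-- ===== PRECONDITION & SPEC =====
def Spec_calculate_subsets_prefix_new_element (prefix_ : List Int) (new_element : List Int) (previous_subsets : List (List Int)) (out : List (List Int)) : Prop := out = calculate_subsets_prefix_new_element_alt prefix_ new_element previous_subsets
instance (prefix_ : List Int) (new_element : List Int) (previous_subsets : List (List Int)) (out : List (List Int)) : Decidable (Spec_calculate_subsets_prefix_new_element prefix_ new_element previous_subsets out) := by unfold Spec_calculate_subsets_prefix_new_element; infer_instance

-- ===== CLAIM (what is proved, stated in full; the proofs are below) =====
def Claim_equal_calculate_subsets_prefix_new_element : Prop := ∀ (prefix_ : List Int) (new_element : List Int) (previous_subsets : List (List Int)), Dom_calculate_subsets_prefix_new_element prefix_ new_element previous_subsets → Spec_calculate_subsets_prefix_new_element prefix_ new_element previous_subsets (calculate_subsets_prefix_new_element prefix_ new_element previous_subsets)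

-- ===== LEMMAS AND PROOFS =====

-- processing the top of the stack equals one recursive call of A, then the rest of the stack
theorem pv_work_cons (ne : List Int) :
    ∀ (n : Nat) (cur : List Int), cur.length < n → ∀ (stack prev : List (List Int)),
      pvWork ne (cur :: stack) prev = pvWork ne stack (calculate_subsets_prefix_new_element cur ne prev) := by
  intro n
  induction n with
  | zero => intro cur h; omega
  | succ n ih =>
    intro cur hlen stack prev
    by_cases hnil : cur = []
    · subst hnil
      rw [pvWork, calculate_subsets_prefix_new_element]
      simp
    · by_cases hmem : cur ++ ne ∈ prev
      · rw [pvWork, calculate_subsets_prefix_new_element]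
        simp [hnil, hmem]
      · rw [pvWork, calculate_subsets_prefix_new_element]
        simp only [hnil, hmem, if_false]
        rw [List.foldl_attach (f := fun acc e => calculate_subsets_prefix_new_element ((PySem.List.remove? cur e).getD []) ne acc)]
        -- fold the children through A's recursion = run them through the stack
        have key : ∀ (cs : List (List Int)), (∀ c ∈ cs, c.length < n) →
            ∀ (st p : List (List Int)),
              pvWork ne (cs ++ st) p
                = pvWork ne st
                    (cs.foldl (fun acc c => calculate_subsets_prefix_new_element c ne acc) p) := by
          intro cs
          induction cs with
          | nil => intro _ st p; simp
          | cons c rest ihc =>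
            intro hcs st p
            simp only [List.cons_append, List.foldl_cons]
            rw [ih c (hcs c (List.mem_cons_self)) (rest ++ st) p]
            exact ihc (fun x hx => hcs x (List.mem_cons_of_mem c hx)) st _
        rw [key _ ?_ stack (prev ++ [cur ++ ne])]
        · rw [List.foldl_map]
        · intro c hc
          rcases List.mem_map.mp hc with ⟨e, he, rfl⟩
          have := pv_child_length he
          omega

-- ===== VERDICT (by name: the statement is the Claim_ definition above) =====
theorem calculate_subsets_prefix_new_element_spec : Claim_equal_calculate_subsets_prefix_new_element := by
  intro prefix_ new_element previous_subsets _
  unfold Spec_calculate_subsets_prefix_new_element calculate_subsets_prefix_new_element_alt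
  rw [pv_work_cons new_element (prefix_.length + 1) prefix_ (Nat.lt_succ_self _) [] previous_subsets]
  rw [pvWork]
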